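-- pv_equiv track=rewrite | github.com/N7Talha/Smart-Traffic-Light-and-lane-Control-System-Using-Computer-Vision-for-intersections | train.py | build_class_mapping
-- ===== SOURCE A (Python) =====
-- def build_class_mapping(original_names, target_classes):
--     """
--     Build mapping from 11-class Udacity dataset to your custom 6-class taxonomy.
--     Returns: dict {old_class_index → new_class_index or None}
--     """
--
--     # Assign indices dynamically based on target_classes list
--     target_to_index = {name: idx for idx, name in enumerate(target_classes)}
--
--     mapping = {}
--
--     for idx, name in enumerate(original_names):
--         n = name.lower()
--
--         # --------------------------
--         # CAR GROUP
--         # --------------------------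
--         if n in ["car", "biker", "truck"]:
--             mapping[idx] = target_to_index["car"]
--
--         # --------------------------
--         # PERSON GROUP
--         # --------------------------
--         elif n == "pedestrian":
--             mapping[idx] = target_to_index["person"]
--
--         # --------------------------
--         # TRAFFIC LIGHT (generic)
--         # --------------------------
--         elif n == "trafficlight":
--             mapping[idx] = target_to_index["traffic_light"]
--
--         # --------------------------
--         # TRAFFIC LIGHT — GREEN
--         # --------------------------
--         elif "green" in n:
--             mapping[idx] = target_to_index["traffic_light_green"]
--
--         # --------------------------
--         # TRAFFIC LIGHT — RED
--         # --------------------------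
--         elif "red" in n:
--             mapping[idx] = target_to_index["traffic_light_red"]
--
--         # --------------------------
--         # TRAFFIC LIGHT — YELLOW
--         # --------------------------
--         elif "yellow" in n:
--             mapping[idx] = target_to_index["traffic_light_yellow"]
--
--         else:
--             mapping[idx] = None  # Ignore class
--
--     return mapping
-- ===== SOURCE B (Python) =====
-- # Staged overwrite passes: paint each substring rule over the whole list in
-- # REVERSE priority order (later passes overwrite earlier ones), then paint
-- # exact matches last, then resolve chosen target names to indices in one
-- # final pass.  Genuinely different traversal: several whole-list passes with
-- # overwriting instead of a per-element first-match branch chain.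
--
-- def build_class_mapping(original_names, target_classes):
--     target_to_index = {name: idx for idx, name in enumerate(target_classes)}
--
--     lows = [s.lower() for s in original_names]
--     chosen = [None] * len(lows)
--
--     # lowest-priority rule first; a later pass overwrites an earlier one
--     for sub, tgt in [("yellow", "traffic_light_yellow"),
--                      ("red", "traffic_light_red"),
--                      ("green", "traffic_light_green")]:
--         for i, s in enumerate(lows):
--             if sub in s:
--                 chosen[i] = tgt
--
--     exact = {"car": "car", "biker": "car", "truck": "car",
--              "pedestrian": "person", "trafficlight": "traffic_light"}
--     for i, s in enumerate(lows):
--         if s in exact: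
--             chosen[i] = exact[s]
--
--     return {i: (target_to_index[t] if t is not None else None)
--             for i, t in enumerate(chosen)}
-- ===== Notes on version B (the rewrite author's own statement) =====
-- stated objective: alternative
-- what changed: Instead of a single pass with a per-element first-match if/elif chain, B makes staged whole-list passes: it paints each substring rule over the list in reverse priority order so later passes overwrite earlier ones, paints exact matches last, and resolves the surviving target names to indices in one final pass.
import Mathlib
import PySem

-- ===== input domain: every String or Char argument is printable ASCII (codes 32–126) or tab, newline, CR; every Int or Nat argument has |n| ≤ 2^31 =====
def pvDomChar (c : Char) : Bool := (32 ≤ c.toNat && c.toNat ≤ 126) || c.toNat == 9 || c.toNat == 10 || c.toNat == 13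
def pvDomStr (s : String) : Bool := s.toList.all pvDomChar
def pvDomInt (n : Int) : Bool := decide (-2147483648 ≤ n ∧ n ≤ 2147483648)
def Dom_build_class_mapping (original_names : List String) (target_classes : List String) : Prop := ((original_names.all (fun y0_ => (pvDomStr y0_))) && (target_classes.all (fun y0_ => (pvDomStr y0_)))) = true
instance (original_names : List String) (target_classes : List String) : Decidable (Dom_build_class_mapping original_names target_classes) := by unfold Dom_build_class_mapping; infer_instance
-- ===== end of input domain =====

-- B replaces A's per-element if/elif chain by staged whole-list overwrite passes (reverse-priority substring rules, then exact matches, then one resolution pass); alternative decomposition, same cost.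


-- ===== PORT A =====
-- target_to_index = {name: idx for idx, name in enumerate(target_classes)}  (shared by both sources, line for line)
def pvT2I (target_classes : List String) : PySem.Dict String Int :=
  PySem.Dict.ofList ((PySem.List.enumerate target_classes).map (fun p => (p.2, p.1)))

-- the loop body of A: the if/elif chain.  target_to_index[k] raises KeyError when k is absent;
-- those inputs are excluded by Pre_, so the `.getD 0` default is never reached on admitted inputs.
def pvBodyA (t2i : PySem.Dict String Int) (name : String) : Option Int :=
  let n := PySem.Str.lower name
  if ["car", "biker", "truck"].contains n then some ((t2i.get? "car").getD 0)
  else if n = "pedestrian" then some ((t2i.get? "person").getD 0)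
  else if n = "trafficlight" then some ((t2i.get? "traffic_light").getD 0)
  else if PySem.Str.isIn "green" n then some ((t2i.get? "traffic_light_green").getD 0)
  else if PySem.Str.isIn "red" n then some ((t2i.get? "traffic_light_red").getD 0)
  else if PySem.Str.isIn "yellow" n then some ((t2i.get? "traffic_light_yellow").getD 0)
  else none

def build_class_mapping (original_names : List String) (target_classes : List String) : List (Int × Option Int) :=
  let t2i := pvT2I target_classes
  ((PySem.List.enumerate original_names).foldl
    (fun (m : PySem.Dict Int (Option Int)) p => m.insert p.1 (pvBodyA t2i p.2))
    PySem.Dict.empty).items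

-- ===== PORT B =====
-- the rule passes, lowest priority first (a later pass overwrites an earlier one)
def pvRulesB : List (String × String) :=
  [("yellow", "traffic_light_yellow"), ("red", "traffic_light_red"), ("green", "traffic_light_green")]

def pvExactB : PySem.Dict String String :=
  PySem.Dict.ofList [("car", "car"), ("biker", "car"), ("truck", "car"),
                     ("pedestrian", "person"), ("trafficlight", "traffic_light")]

-- 'for i, s in enumerate(lows): if sub in s: chosen[i] = tgt'  — a pointwise overwrite of chosen
def pvPass (lows : List String) (chosen : List (Option String)) (rule : String × String) : List (Option String) :=
  List.zipWith (fun s c => if PySem.Str.isIn rule.1 s then some rule.2 else c) lows chosen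

def build_class_mapping_alt (original_names : List String) (target_classes : List String) : List (Int × Option Int) :=
  let t2i := pvT2I target_classes
  let lows := original_names.map PySem.Str.lower
  let chosen0 : List (Option String) := List.replicate lows.length none
  let chosen1 := pvRulesB.foldl (pvPass lows) chosen0
  -- 'for i, s in enumerate(lows): if s in exact: chosen[i] = exact[s]'
  let chosen2 := List.zipWith (fun s c => match pvExactB.get? s with | some t => some t | none => c) lows chosen1
  -- final resolution pass: target_to_index[t] raises KeyError when t is absent (excluded by Pre_; `.getD 0` never reached)
  (PySem.List.enumerate chosen2).map (fun p => (p.1, p.2.map (fun t => (t2i.get? t).getD 0)))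

-- ===== PRECONDITION & SPEC =====
-- Pre_ excludes exactly the inputs where Python A raises KeyError: some name classifies to a
-- target class name that is missing from target_classes.
def Pre_build_class_mapping (original_names : List String) (target_classes : List String) : Prop :=
  ∀ name ∈ original_names,
    (let n := PySem.Str.lower name
     if n = "car" ∨ n = "biker" ∨ n = "truck" then "car" ∈ target_classes
     else if n = "pedestrian" then "person" ∈ target_classes
     else if n = "trafficlight" then "traffic_light" ∈ target_classes
     else if PySem.Str.isIn "green" n then "traffic_light_green" ∈ target_classes
     else if PySem.Str.isIn "red" n then "traffic_light_red" ∈ target_classes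
     else if PySem.Str.isIn "yellow" n then "traffic_light_yellow" ∈ target_classes
     else True)
instance (original_names : List String) (target_classes : List String) : Decidable (Pre_build_class_mapping original_names target_classes) := by unfold Pre_build_class_mapping; infer_instance

def pvWitness_build_class_mapping : List String × List String :=
  (["Car", "pedestrian", "xRedx", "dog"],
   ["car", "person", "traffic_light", "traffic_light_green", "traffic_light_red", "traffic_light_yellow"])

def Spec_build_class_mapping (original_names : List String) (target_classes : List String) (out : List (Int × Option Int)) : Prop := out = build_class_mapping_alt original_names target_classes
instance (original_names : List String) (target_classes : List String) (out : List (Int × Option Int)) : Decidable (Spec_build_class_mapping original_names target_classes out) := by unfold Spec_build_class_mapping; infer_instance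

-- ===== CLAIM (what is proved, stated in full; the proofs are below) =====
def Claim_equal_build_class_mapping : Prop := ∀ (original_names : List String) (target_classes : List String), Dom_build_class_mapping original_names target_classes → Pre_build_class_mapping original_names target_classes → Spec_build_class_mapping original_names target_classes (build_class_mapping original_names target_classes)

-- ===== LEMMAS AND PROOFS =====

-- a pointwise pass over (l, l.map f) is a map
lemma zipWith_map_self {α β γ : Type} (l : List α) (f : α → β) (h : α → β → γ) :
    List.zipWith h l (l.map f) = l.map (fun s => h s (f s)) := by
  induction l with
  | nil => rfl
  | cons a t ih => simp [ih]

-- the chosen-name chain B computes per lowered name after all its passes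
def pvPick (n : String) : Option String :=
  match pvExactB.get? n with
  | some t => some t
  | none =>
    if PySem.Str.isIn "green" n then some "traffic_light_green"
    else if PySem.Str.isIn "red" n then some "traffic_light_red"
    else if PySem.Str.isIn "yellow" n then some "traffic_light_yellow"
    else none

lemma chosen2_eq (lows : List String) :
    List.zipWith (fun s c => match pvExactB.get? s with | some t => some t | none => c) lows
      (pvRulesB.foldl (pvPass lows) (List.replicate lows.length none))
    = lows.map pvPick := by
  have h0 : (List.replicate lows.length none : List (Option String)) = lows.map (fun _ => none) := by
    simp [List.map_const']
  rw [pvRulesB, h0]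
  simp only [List.foldl, pvPass, zipWith_map_self]
  rfl

-- pvExactB is the literal five-entry dict; its lookup as an if-chain
lemma pvExactB_get? (n : String) : pvExactB.get? n =
    (if n = "car" ∨ n = "biker" ∨ n = "truck" then some "car"
     else if n = "pedestrian" then some "person"
     else if n = "trafficlight" then some "traffic_light"
     else none) := by
  have h : pvExactB = PySem.Dict.mk [("car", "car"), ("biker", "car"), ("truck", "car"),
                     ("pedestrian", "person"), ("trafficlight", "traffic_light")] := by rfl
  rw [h]
  simp only [PySem.Dict.get?_mk_cons, beq_iff_eq]
  by_cases h1 : n = "car" <;> by_cases h2 : n = "biker" <;> by_cases h3 : n = "truck" <;>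
    by_cases h4 : n = "pedestrian" <;> by_cases h5 : n = "trafficlight" <;>
    simp_all [eq_comm, PySem.Dict.get?]

-- the per-name decisions of A and B coincide (for every t2i)
lemma pvBody_eq (t2i : PySem.Dict String Int) (name : String) :
    pvBodyA t2i name = (pvPick (PySem.Str.lower name)).map (fun t => (t2i.get? t).getD 0) := by
  unfold pvBodyA pvPick
  dsimp only
  rw [pvExactB_get?]
  simp only [List.contains_cons, List.contains_nil, Bool.or_false, beq_iff_eq, Bool.or_eq_true]
  split_ifs <;> simp_all

-- enumerate of a mapped list
lemma enumerate_map {α β : Type} (f : α → β) (l : List α) (s : Int) :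
    PySem.List.enumerate (l.map f) s = (PySem.List.enumerate l s).map (fun p => (p.1, f p.2)) := by
  induction l generalizing s with
  | nil => simp [PySem.List.enumerate_nil]
  | cons a t ih => simp [PySem.List.enumerate_cons, ih]

-- ===== VERDICT (by name: the statement is the Claim_ definition above) =====
theorem build_class_mapping_spec : Claim_equal_build_class_mapping := by
  intro original_names target_classes _ _
  unfold Spec_build_class_mapping build_class_mapping build_class_mapping_alt
  dsimp only
  rw [PySem.Dict.items_foldl_insert_fresh (PySem.List.enumerate original_names)
        (fun p => p.1) (fun p => pvBodyA (pvT2I target_classes) p.2) PySem.Dict.empty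
        (by intro a _; simp [PySem.Dict.contains_empty])
        (by rw [PySem.List.map_fst_enumerate]; exact PySem.List.nodup_pyRange_one _ _)]
  rw [chosen2_eq, List.map_map, enumerate_map]
  simp [pvBody_eq, PySem.Dict.empty, Function.comp]
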